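-- pv_equiv track=rewrite | github.com/GameMaker2k/PyUPC-EAN | upcean/convert/convert.py | convert_text_to_code93ext
-- ===== SOURCE A (Python) =====
-- def convert_text_to_code93ext(upc):
--     code93_char_to_encoding = {}
--
--     # Map non-printable ASCII characters (0-26)
--     for i in range(0, 27):
--         code93_char_to_encoding[chr(i)] = '$' + chr(i + 64)  # $A - $Z
--
--     # Map ASCII 27-31
--     special_chars = {27: '%A', 28: '%B', 29: '%C', 30: '%D', 31: '%E'}
--     for i in range(27, 32):
--         code93_char_to_encoding[chr(i)] = special_chars[i]
--
--     # Map printable ASCII characters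
--     for i in range(32, 127):
--         char = chr(i)
--         if char.isalnum() or char in '-. $/+%':
--             code93_char_to_encoding[char] = char
--         elif 33 <= i <= 44:
--             code93_char_to_encoding[char] = '/' + chr(i + 32)  # /A - /O
--         elif 45 <= i <= 57:
--             code93_char_to_encoding[char] = char  # 0-9, -, .
--         elif 58 <= i <= 63:
--             code93_char_to_encoding[char] = '%' + chr(i + 11)  # %F - %J
--         elif 64 == i:
--             code93_char_to_encoding[char] = '%V'  # @
--         elif 91 <= i <= 95:
--             code93_char_to_encoding[char] = '%' + chr(i - 27)  # %K - %O
--         elif 96 == i: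
--             code93_char_to_encoding[char] = '%W'  # `
--         elif 97 <= i <= 122:
--             code93_char_to_encoding[char] = '+' + chr(i - 32)  # +A - +Z
--         elif 123 <= i <= 126:
--             code93_char_to_encoding[char] = '%' + chr(i - 80)  # %P - %S
--         else:
--             # Characters not in encoding map are replaced with space
--             code93_char_to_encoding[char] = ' '
--
--     # Map DEL character (ASCII 127) to '%T'
--     code93_char_to_encoding[chr(127)] = '%T'
--
--     encoded = ''
--     for char in upc:
--         if char in code93_char_to_encoding:
--             encoded += code93_char_to_encoding[char]
--         else:
--             # Characters not in encoding map are replaced with space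
--             encoded += ' '
--     return encoded
-- ===== SOURCE B (Python) =====
-- def convert_text_to_code93ext(upc):
--     def encode_char(char):
--         n = ord(char)
--         if char.isalnum() or char in '-. $/+%':
--             return char
--         if n < 27:
--             return '$' + chr(n + 64)
--         if 27 <= n <= 31:
--             return '%' + chr(n + 38)
--         if 33 <= n <= 44:
--             return '/' + chr(n + 32)
--         if 58 <= n <= 63:
--             return '%' + chr(n + 11)
--         if n == 64:
--             return '%V'
--         if 91 <= n <= 95:
--             return '%' + chr(n - 27)
--         if n == 96:
--             return '%W'
--         if 123 <= n <= 126: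
--             return '%' + chr(n - 80)
--         if n == 127:
--             return '%T'
--         return ' '
--     return ''.join(encode_char(char) for char in upc)
-- ===== Notes on version B (the rewrite author's own statement) =====
-- stated objective: simpler
-- what changed: B drops A's precomputed 128-entry encoding dict (three range loops building it, then per-char dict lookup) and instead encodes each character directly with a branch-on-ord helper joined over the string.
import Mathlib
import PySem

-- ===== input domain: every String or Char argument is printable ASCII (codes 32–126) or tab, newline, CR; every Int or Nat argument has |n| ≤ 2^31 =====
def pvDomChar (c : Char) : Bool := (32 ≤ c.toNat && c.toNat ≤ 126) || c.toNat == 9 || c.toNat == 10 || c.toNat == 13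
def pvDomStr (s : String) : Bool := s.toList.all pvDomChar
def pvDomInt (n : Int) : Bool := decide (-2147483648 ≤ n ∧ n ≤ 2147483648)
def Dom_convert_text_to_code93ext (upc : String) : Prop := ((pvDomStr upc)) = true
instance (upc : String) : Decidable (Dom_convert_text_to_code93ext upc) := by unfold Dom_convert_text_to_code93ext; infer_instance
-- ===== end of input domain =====

-- B replaces A's precomputed 128-entry dict with a direct per-character branch function joined over the string (objective: simpler).

-- ===== PORT A =====
-- chr(i) for an Int in 0..127 (all uses of chr in A are in that range)
def pyChr (i : Int) : Char := Char.ofNat i.toNat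

-- the dict A builds before scanning the input (input-independent, so a helper)
def code93Dict : PySem.Dict Char String :=
  let d : PySem.Dict Char String := PySem.Dict.empty
  -- for i in range(0, 27): d[chr(i)] = '$' + chr(i + 64)
  let d := (PySem.List.pyRange 0 27 1).foldl
    (fun d i => d.insert (pyChr i) ("$" ++ String.singleton (pyChr (i + 64)))) d
  -- special_chars = {27:'%A', …}; for i in range(27, 32): d[chr(i)] = special_chars[i]
  let special : PySem.Dict Int String :=
    PySem.Dict.ofList [(27, "%A"), (28, "%B"), (29, "%C"), (30, "%D"), (31, "%E")]
  let d := (PySem.List.pyRange 27 32 1).foldl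
    (fun d i => d.insert (pyChr i) ((special.get? i).getD "")) d   -- special_chars[i]: key always present, so getD "" is exact
  -- for i in range(32, 127): …
  let d := (PySem.List.pyRange 32 127 1).foldl
    (fun d i =>
      let ch := pyChr i
      if PySem.Chars.isalnum ch || ch ∈ "-. $/+%".toList then d.insert ch (String.singleton ch)
      else if 33 ≤ i ∧ i ≤ 44 then d.insert ch ("/" ++ String.singleton (pyChr (i + 32)))
      else if 45 ≤ i ∧ i ≤ 57 then d.insert ch (String.singleton ch)
      else if 58 ≤ i ∧ i ≤ 63 then d.insert ch ("%" ++ String.singleton (pyChr (i + 11)))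
      else if i = 64 then d.insert ch "%V"
      else if 91 ≤ i ∧ i ≤ 95 then d.insert ch ("%" ++ String.singleton (pyChr (i - 27)))
      else if i = 96 then d.insert ch "%W"
      else if 97 ≤ i ∧ i ≤ 122 then d.insert ch ("+" ++ String.singleton (pyChr (i - 32)))
      else if 123 ≤ i ∧ i ≤ 126 then d.insert ch ("%" ++ String.singleton (pyChr (i - 80)))
      else d.insert ch " ") d
  -- d[chr(127)] = '%T'
  d.insert (pyChr 127) "%T"

def convert_text_to_code93ext (upc : String) : String :=
  upc.toList.foldl
    (fun encoded ch =>
      if code93Dict.contains ch then encoded ++ (code93Dict.get? ch).getD ""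
      else encoded ++ " ") ""

-- ===== PORT B =====
def encodeChar93 (c : Char) : String :=
  let n : Nat := c.toNat
  if PySem.Chars.isalnum c || c ∈ "-. $/+%".toList then String.singleton c
  else if n < 27 then "$" ++ String.singleton (Char.ofNat (n + 64))
  else if 27 ≤ n ∧ n ≤ 31 then "%" ++ String.singleton (Char.ofNat (n + 38))
  else if 33 ≤ n ∧ n ≤ 44 then "/" ++ String.singleton (Char.ofNat (n + 32))
  else if 58 ≤ n ∧ n ≤ 63 then "%" ++ String.singleton (Char.ofNat (n + 11))
  else if n = 64 then "%V"
  else if 91 ≤ n ∧ n ≤ 95 then "%" ++ String.singleton (Char.ofNat (n - 27))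
  else if n = 96 then "%W"
  else if 123 ≤ n ∧ n ≤ 126 then "%" ++ String.singleton (Char.ofNat (n - 80))
  else if n = 127 then "%T"
  else " "

-- ''.join(…) ported by hand, step for step (exact for the empty separator)
def joinAll93 : List String → String
  | [] => ""
  | s :: rest => s ++ joinAll93 rest

def convert_text_to_code93ext_alt (upc : String) : String :=
  joinAll93 (upc.toList.map encodeChar93)

-- ===== PRECONDITION & SPEC =====
def Spec_convert_text_to_code93ext (upc : String) (out : String) : Prop := out = convert_text_to_code93ext_alt upc
instance (upc : String) (out : String) : Decidable (Spec_convert_text_to_code93ext upc out) := by unfold Spec_convert_text_to_code93ext; infer_instance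

-- ===== CLAIM (what is proved, stated in full; the proofs are below) =====
def Claim_equal_convert_text_to_code93ext : Prop := ∀ (upc : String), Dom_convert_text_to_code93ext upc → Spec_convert_text_to_code93ext upc (convert_text_to_code93ext upc)

-- ===== LEMMAS AND PROOFS =====

-- A's per-character step (lookup in the prebuilt dict, space if absent)
def aStep93 (c : Char) : String :=
  if code93Dict.contains c then (code93Dict.get? c).getD "" else " "

-- the two per-character encodings agree on every 7-bit character, checked by evaluation
set_option maxRecDepth 100000 in
theorem step_eq_fin : ∀ n : Fin 128, aStep93 (Char.ofNat n.val) = encodeChar93 (Char.ofNat n.val) := by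
  decide

set_option maxRecDepth 100000 in
theorem step_eq (c : Char) (h : pvDomChar c = true) : aStep93 c = encodeChar93 c := by
  have hlt : c.toNat < 128 := by
    simp only [pvDomChar, Bool.or_eq_true, Bool.and_eq_true, decide_eq_true_eq, beq_iff_eq] at h
    omega
  have := step_eq_fin ⟨c.toNat, hlt⟩
  simpa [Char.ofNat_toNat] using this

set_option maxRecDepth 8000 in
theorem foldl_eq (l : List Char) (acc : String) (h : l.all pvDomChar = true) :
    l.foldl (fun encoded ch =>
      if code93Dict.contains ch then encoded ++ (code93Dict.get? ch).getD ""
      else encoded ++ " ") acc = acc ++ joinAll93 (l.map encodeChar93) := by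
  induction l generalizing acc with
  | nil => simp [joinAll93]
  | cons c rest ih =>
    simp only [List.all_cons, Bool.and_eq_true] at h
    have hc := step_eq c h.1
    simp only [List.foldl_cons, List.map_cons, joinAll93]
    rw [ih _ h.2, ← String.append_assoc, ← hc]
    unfold aStep93
    by_cases hP : code93Dict.contains c = true <;> simp only [hP, if_true, if_false, Bool.false_eq_true]

-- ===== VERDICT (by name: the statement is the Claim_ definition above) =====
theorem convert_text_to_code93ext_spec : Claim_equal_convert_text_to_code93ext := by
  intro upc hdom
  unfold Spec_convert_text_to_code93ext convert_text_to_code93ext convert_text_to_code93ext_alt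
  rw [foldl_eq _ _ hdom]
  simp
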